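-- pv_equiv track=rewrite | github.com/silverchan08/R-E | examine_handcuff.py | isOneComponent
-- ===== SOURCE A (Python) =====
-- from collections import deque
--
-- def isOneComponent(cromwell_bit):
--     n = len(cromwell_bit)
--
--     visited = [[False] * (n+1) for _ in range(n)]
--
--     def bfs(start_row, start_col):
--         q = deque([(start_row, start_col)])
--         visited[start_row][start_col] = True
--         while q:
--             r, c = q.popleft()
--             same_row = [i for i in range(n+1) if (cromwell_bit[r] >> i) & 1 and not visited[r][i]]
--             same_col = [i for i in range(n) if (cromwell_bit[i] >> c) & 1 and not visited[i][c]]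
--             for nc in same_row:
--                 visited[r][nc] = True
--                 q.append((r, nc))
--             for nr in same_col:
--                 visited[nr][c] = True
--                 q.append((nr, c))
--
--     components = 0
--
--     for i in range(n):
--         for j in range(n+1):
--             if (cromwell_bit[i] >> j) & 1 and not visited[i][j]:
--                 components += 1
--                 if components > 1:
--                     return False
--                 bfs(i, j)
--                 break
--     return True
-- ===== SOURCE B (Python) =====
-- from collections import deque
--
-- def isOneComponent(cromwell_bit):
--     n = len(cromwell_bit)
--     full = (1 << (n + 1)) - 1
--     masks = [x & full for x in cromwell_bit]
--     r0 = next((r for r in range(n) if masks[r]), None)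
--     if r0 is None:
--         return True
--     seen = {r0}
--     q = deque([r0])
--     while q:
--         r = q.popleft()
--         for s in range(n):
--             if s not in seen and masks[s] & masks[r]:
--                 seen.add(s)
--                 q.append(s)
--     return all(r in seen for r in range(n) if masks[r])
-- ===== Notes on version B (the rewrite author's own statement) =====
-- stated objective: faster
-- what changed: A runs a BFS over the individual set cells of the n x (n+1) bit grid, rescanning a whole row and column per dequeued cell; B collapses each row to one bitmask and runs a BFS over rows only, where adjacency of two rows is a single mask intersection, then checks that every nonzero row was reached.
import Mathlib
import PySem

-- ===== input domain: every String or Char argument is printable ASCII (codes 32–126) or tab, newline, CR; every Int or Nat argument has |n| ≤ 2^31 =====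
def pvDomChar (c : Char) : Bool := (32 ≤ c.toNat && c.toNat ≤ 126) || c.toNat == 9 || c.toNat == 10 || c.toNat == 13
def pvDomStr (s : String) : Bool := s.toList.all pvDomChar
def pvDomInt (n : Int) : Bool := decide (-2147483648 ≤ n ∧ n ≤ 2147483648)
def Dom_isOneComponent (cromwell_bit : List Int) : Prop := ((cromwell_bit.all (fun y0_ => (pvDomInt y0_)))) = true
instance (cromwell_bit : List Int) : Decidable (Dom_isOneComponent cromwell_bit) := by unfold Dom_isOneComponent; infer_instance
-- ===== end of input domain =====

-- B replaces A's cell-by-cell BFS over the n×(n+1) bit grid by a BFS over rows only,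
-- with each row collapsed to a bitmask so that row adjacency is one mask intersection
-- (objective: faster; return value only, neither version mutates its argument).

-- ===== PORT A =====

/-- `(x >> j) & 1` truthiness test of A. -/
def pvBit (x : Int) (j : Nat) : Bool := PySem.Int.band (x >>> j) 1 == 1

/-- A's `same_row` comprehension. -/
def pvSameRow (bits : List Int) (n r : Nat) (vis : List (Nat × Nat)) : List Nat :=
  (List.range (n+1)).filter (fun i => pvBit (bits.getD r 0) i && !(vis.contains (r, i)))

/-- A's `same_col` comprehension. -/
def pvSameCol (bits : List Int) (n c : Nat) (vis : List (Nat × Nat)) : List Nat :=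
  (List.range n).filter (fun i => pvBit (bits.getD i 0) c && !(vis.contains (i, c)))

/-- A's `while q:` BFS loop; the visited matrix is kept as the list of marked cells.
    The fuel only makes the loop total; `n*(n+1)` pops provably suffice. -/
def pvBfsA (bits : List Int) (n : Nat) : Nat → List (Nat × Nat) → List (Nat × Nat) → List (Nat × Nat)
  | 0, _, vis => vis
  | _ + 1, [], vis => vis
  | fuel + 1, (r, c) :: q, vis =>
      let sr := pvSameRow bits n r vis
      let sc := pvSameCol bits n c vis
      pvBfsA bits n fuel (q ++ sr.map (fun i => (r, i)) ++ sc.map (fun i => (i, c)))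
        (vis ++ sr.map (fun i => (r, i)) ++ sc.map (fun i => (i, c)))

/-- A's inner `for j in range(n+1): if … break` = first unvisited set cell of row `i`. -/
def pvRowFind (bits : List Int) (n i : Nat) (vis : List (Nat × Nat)) : Option Nat :=
  (List.range (n+1)).find? (fun j => pvBit (bits.getD i 0) j && !(vis.contains (i, j)))

/-- A's outer `for i in range(n)` loop carrying `visited` and `components`. -/
def pvOuterA (bits : List Int) (n : Nat) : List Nat → List (Nat × Nat) → Nat → Bool
  | [], _, _ => true
  | i :: rest, vis, comp =>
      match pvRowFind bits n i vis with
      | none => pvOuterA bits n rest vis comp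
      | some j =>
          if comp + 1 > 1 then false
          else pvOuterA bits n rest (pvBfsA bits n (n * (n+1)) [(i, j)] (vis ++ [(i, j)])) (comp + 1)

def isOneComponent (cromwell_bit : List Int) : Bool :=
  pvOuterA cromwell_bit cromwell_bit.length (List.range cromwell_bit.length) [] 0

-- ===== PORT B =====

/-- B's `while q:` BFS loop over rows; `seen` is the set of seen rows in insertion order. -/
def pvBfsB (masks : List Int) (n : Nat) : Nat → List Nat → List Nat → List Nat
  | 0, _, seen => seen
  | _ + 1, [], seen => seen
  | fuel + 1, r :: q, seen =>
      let new := (List.range n).filter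
        (fun s => !(seen.contains s) && (PySem.Int.band (masks.getD s 0) (masks.getD r 0) != 0))
      pvBfsB masks n fuel (q ++ new) (seen ++ new)

def isOneComponent_alt (cromwell_bit : List Int) : Bool :=
  let n := cromwell_bit.length
  let masks := cromwell_bit.map (fun x => PySem.Int.band x (2 ^ (n+1) - 1))
  match (List.range n).find? (fun r => masks.getD r 0 != 0) with
  | none => true
  | some r0 =>
      let seen := pvBfsB masks n n [r0] [r0]
      ((List.range n).filter (fun r => masks.getD r 0 != 0)).all (fun r => seen.contains r)

-- ===== PRECONDITION & SPEC =====
def Spec_isOneComponent (cromwell_bit : List Int) (out : Bool) : Prop := out = isOneComponent_alt cromwell_bit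
instance (cromwell_bit : List Int) (out : Bool) : Decidable (Spec_isOneComponent cromwell_bit out) := by unfold Spec_isOneComponent; infer_instance

-- ===== CLAIM (what is proved, stated in full; the proofs are below) =====
def Claim_equal_isOneComponent : Prop := ∀ (cromwell_bit : List Int), Dom_isOneComponent cromwell_bit → Spec_isOneComponent cromwell_bit (isOneComponent cromwell_bit)

-- ===== LEMMAS AND PROOFS =====

theorem pv_not_contains {α : Type} [BEq α] [LawfulBEq α] (l : List α) (a : α) :
    ((!l.contains a) = true) ↔ a ∉ l := by simp

-- ---------- generic worklist saturation ----------

/-- Abstract worklist loop: pop from the front, push the step's new elements. -/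
def pvWl {α : Type} (step : α → List α → List α) : Nat → List α → List α → List α
  | 0, _, seen => seen
  | _ + 1, [], seen => seen
  | fuel + 1, x :: q, seen => pvWl step fuel (q ++ step x seen) (seen ++ step x seen)

theorem pvWl_mono {α : Type} (step : α → List α → List α) :
    ∀ (f : Nat) (q seen : List α) (y : α), y ∈ seen → y ∈ pvWl step f q seen := by
  intro f
  induction f with
  | zero => intro q seen y h; simpa [pvWl] using h
  | succ f ih =>
    intro q seen y h
    cases q with
    | nil => simpa [pvWl] using h
    | cons x q' => exact ih _ _ y (by simp [h])

/-- Main worklist invariant lemma: soundness and closedness of the final seen set. -/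
theorem pvWl_main {α : Type} [DecidableEq α]
    (step : α → List α → List α) (edge : α → α → Prop) (univ : List α)
    (hstep : ∀ x seen y, x ∈ seen → x ∈ univ →
      (y ∈ step x seen ↔ (edge x y ∧ y ∉ seen)))
    (hstepnd : ∀ x seen, x ∈ seen → (step x seen).Nodup)
    (hedgeU : ∀ x y, edge x y → y ∈ univ) :
    ∀ (f : Nat) (q seen : List α),
      seen.Nodup → (∀ x ∈ q, x ∈ seen) → (∀ x ∈ seen, x ∈ univ) →
      (∀ x ∈ seen, x ∉ q → ∀ y, edge x y → y ∈ seen) →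
      q.length + (univ.length - seen.length) ≤ f →
      (∀ y ∈ pvWl step f q seen, y ∈ seen ∨ ∃ x ∈ q, Relation.ReflTransGen edge x y) ∧
      (∀ a ∈ pvWl step f q seen, ∀ y, edge a y → y ∈ pvWl step f q seen) := by
  intro f
  induction f with
  | zero =>
    intro q seen hnd hq hU' hcl hb
    have hq0 : q = [] := by cases q with | nil => rfl | cons a l => simp at hb
    subst hq0
    refine ⟨fun y hy => Or.inl (by simpa [pvWl] using hy), fun a ha y hey => ?_⟩
    simp only [pvWl] at ha ⊢
    exact hcl a ha (by simp) y hey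
  | succ f ih =>
    intro q seen hnd hq hU' hcl hb
    cases q with
    | nil =>
      refine ⟨fun y hy => Or.inl (by simpa [pvWl] using hy), fun a ha y hey => ?_⟩
      simp only [pvWl] at ha ⊢
      exact hcl a ha (by simp) y hey
    | cons x q' =>
      have hxseen : x ∈ seen := hq x (by simp)
      have hxU : x ∈ univ := hU' x hxseen
      have hchar : ∀ y, y ∈ step x seen ↔ edge x y ∧ y ∉ seen :=
        fun y => hstep x seen y hxseen hxU
      have hun : pvWl step (f+1) (x :: q') seen
          = pvWl step f (q' ++ step x seen) (seen ++ step x seen) := rfl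
      have hnd' : (seen ++ step x seen).Nodup := by
        refine List.Nodup.append hnd (hstepnd x seen hxseen) (List.disjoint_left.2 ?_)
        intro a ha hanw
        exact ((hchar a).1 hanw).2 ha
      have hsub' : ∀ z ∈ q' ++ step x seen, z ∈ seen ++ step x seen := by
        intro z hz
        rcases List.mem_append.1 hz with h | h
        · exact List.mem_append.2 (Or.inl (hq z (by simp [h])))
        · exact List.mem_append.2 (Or.inr h)
      have hU'' : ∀ z ∈ seen ++ step x seen, z ∈ univ := by
        intro z hz
        rcases List.mem_append.1 hz with h | h
        · exact hU' z h
        · exact hedgeU x z ((hchar z).1 h).1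
      have hcl' : ∀ a ∈ seen ++ step x seen, a ∉ q' ++ step x seen →
          ∀ y, edge a y → y ∈ seen ++ step x seen := by
        intro a ha hnq y hey
        rcases List.mem_append.1 ha with h | h
        · by_cases hax : a = x
          · subst hax
            by_cases hysn : y ∈ seen
            · exact List.mem_append.2 (Or.inl hysn)
            · exact List.mem_append.2 (Or.inr ((hchar y).2 ⟨hey, hysn⟩))
          · have hnot : a ∉ x :: q' := by
              intro hc
              rcases List.mem_cons.1 hc with h1 | h1
              · exact hax h1
              · exact hnq (List.mem_append.2 (Or.inl h1))
            exact List.mem_append.2 (Or.inl (hcl a h hnot y hey))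
        · exact absurd (List.mem_append.2 (Or.inr h)) hnq
      have hlen : (seen ++ step x seen).length ≤ univ.length :=
        (hnd'.subperm (fun z hz => hU'' z hz)).length_le
      have hb' : (q' ++ step x seen).length
          + (univ.length - (seen ++ step x seen).length) ≤ f := by
        simp only [List.length_append] at hlen hb ⊢
        simp only [List.length_cons] at hb
        omega
      have hrec := ih (q' ++ step x seen) (seen ++ step x seen) hnd' hsub' hU'' hcl' hb'
      constructor
      · intro y hy
        rw [hun] at hy
        rcases hrec.1 y hy with h | ⟨z, hz, hzy⟩
        · rcases List.mem_append.1 h with h1 | h1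
          · exact Or.inl h1
          · exact Or.inr ⟨x, by simp, Relation.ReflTransGen.single ((hchar y).1 h1).1⟩
        · rcases List.mem_append.1 hz with h1 | h1
          · exact Or.inr ⟨z, by simp [h1], hzy⟩
          · exact Or.inr ⟨x, by simp, Relation.ReflTransGen.head ((hchar z).1 h1).1 hzy⟩
      · intro a ha y hey
        rw [hun] at ha ⊢
        exact hrec.2 a ha y hey

/-- Characterization of the worklist result started from one seed. -/
theorem pvWl_spec {α : Type} [DecidableEq α]
    (step : α → List α → List α) (edge : α → α → Prop) (univ : List α)
    (hstep : ∀ x seen y, x ∈ seen → x ∈ univ →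
      (y ∈ step x seen ↔ (edge x y ∧ y ∉ seen)))
    (hstepnd : ∀ x seen, x ∈ seen → (step x seen).Nodup)
    (hedgeU : ∀ x y, edge x y → y ∈ univ)
    (s : α) (hs : s ∈ univ) (f : Nat) (hf : univ.length ≤ f) :
    ∀ y, y ∈ pvWl step f [s] [s] ↔ Relation.ReflTransGen edge s y := by
  have hpos : 0 < univ.length := List.length_pos_of_mem hs
  have H := pvWl_main step edge univ hstep hstepnd hedgeU f [s] [s]
    (by simp) (by simp) (by simpa using hs) (by simp) (by simp; omega)
  intro y
  constructor
  · intro hy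
    rcases H.1 y hy with h | ⟨x, hx, hxy⟩
    · simp at h; subst h; exact Relation.ReflTransGen.refl
    · simp at hx; subst hx; exact hxy
  · intro hr
    induction hr with
    | refl => exact pvWl_mono step f [s] [s] s (by simp)
    | tail hab e ihab => exact H.2 _ ihab _ e

-- ---------- arithmetic bridge ----------

theorem pv_band_mask (x : Int) (k : Nat) :
    PySem.Int.band x (2 ^ k - 1) = x % (2 ^ k : Nat) := by
  have hpow : ((2 ^ k : Nat) : Int) = 2 ^ k := by push_cast; ring
  have hP : (0:Int) < ((2 ^ k : Nat) : Int) := by exact_mod_cast Nat.two_pow_pos k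
  have hb : (0:Int) ≤ 2 ^ k - 1 := by rw [← hpow] at *; omega
  have htn : ((2:Int) ^ k - 1).toNat = 2 ^ k - 1 := by rw [← hpow]; omega
  unfold PySem.Int.band
  by_cases hx : 0 ≤ x
  · rw [if_pos hx, if_pos hb, htn, Nat.and_two_pow_sub_one_eq_mod]
    push_cast [Int.toNat_of_nonneg hx]
    rfl
  · rw [if_neg hx, if_pos hb, htn]
    set m := (-x - 1).toNat with hm
    have hxm : x = -(m:Int) - 1 := by omega
    have hand : (2 ^ k - 1) &&& m = m % 2 ^ k := by
      rw [Nat.land_comm]; exact Nat.and_two_pow_sub_one_eq_mod m k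
    rw [hand]
    have hmlt : m % 2 ^ k < 2 ^ k := Nat.mod_lt _ (Nat.two_pow_pos k)
    have hdmI : ((2 ^ k : Nat) : Int) * ((m / 2 ^ k : Nat) : Int)
        + ((m % 2 ^ k : Nat) : Int) = (m : Int) := by exact_mod_cast Nat.div_add_mod m (2 ^ k)
    have e1 : x = (((2 ^ k : Nat) : Int) - 1 - ((m % 2 ^ k : Nat) : Int))
        + ((2 ^ k : Nat) : Int) * (-(((m / 2 ^ k : Nat)) : Int) - 1) := by
      rw [hxm]; linear_combination hdmI
    have hcast : ((m % 2 ^ k : Nat) : Int) < ((2 ^ k : Nat) : Int) := by exact_mod_cast hmlt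
    have hge : (0:Int) ≤ ((2 ^ k : Nat) : Int) - 1 - ((m % 2 ^ k : Nat) : Int) := by omega
    have hlt : ((2 ^ k : Nat) : Int) - 1 - ((m % 2 ^ k : Nat) : Int) < ((2 ^ k : Nat) : Int) := by
      omega
    rw [e1, Int.add_mul_emod_self_left, Int.emod_eq_of_lt hge hlt]
    omega

theorem pv_testBit_div_mod (m c : Nat) : m.testBit c = decide (m / 2 ^ c % 2 = 1) :=
  Nat.testBit_eq_decide_div_mod_eq

theorem pv_bit_testBit (x : Int) (k c : Nat) (hc : c < k) :
    pvBit x c = (PySem.Int.band x (2 ^ k - 1)).toNat.testBit c := by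
  rw [pv_band_mask, pv_testBit_div_mod]
  unfold pvBit
  rw [PySem.Int.band_one, PySem.Int.mod_eq_emod_of_pos (by norm_num),
    Int.shiftRight_eq_div_pow]
  have hpc : ((2 ^ c : Nat) : Int) = 2 ^ c := by push_cast; ring
  have hpk : ((2 ^ k : Nat) : Int) = 2 ^ k := by push_cast; ring
  rw [hpc, hpk]
  have hy0 : 0 ≤ x % (2:Int) ^ k :=
    Int.emod_nonneg x (by positivity)
  have hkc : c + (k - c - 1) + 1 = k := by omega
  have hn : (2:Nat) ^ k = 2 ^ c * (2 * 2 ^ (k - c - 1)) := by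
    conv_lhs => rw [← hkc]
    rw [pow_add, pow_add, pow_one]
    ring
  have hsplit : (2:Int) ^ k = 2 ^ c * (2 * 2 ^ (k - c - 1)) := by exact_mod_cast hn
  have h2 := Int.emod_add_ediv x ((2:Int) ^ k)
  have hq : x = x % (2:Int) ^ k
      + (((2:Int) ^ (k - c - 1) * (x / (2:Int) ^ k)) * 2) * (2:Int) ^ c := by
    linear_combination - h2 + (x / (2:Int) ^ k) * hsplit
  have hdiv : x / (2:Int) ^ c % 2 = (x % (2:Int) ^ k) / (2:Int) ^ c % 2 := by
    conv_lhs => rw [hq]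
    rw [Int.add_mul_ediv_right _ _ (by positivity : (2:Int) ^ c ≠ 0)]
    omega
  have ht : ((x % (2:Int) ^ k).toNat : Int) = x % (2:Int) ^ k := Int.toNat_of_nonneg hy0
  have hcast : (x % (2:Int) ^ k) / (2:Int) ^ c % 2
      = (((x % (2:Int) ^ k).toNat / 2 ^ c % 2 : Nat) : Int) := by
    push_cast [ht]
    rfl
  rw [hdiv, hcast, Bool.eq_iff_iff]
  simp only [beq_iff_eq, decide_eq_true_eq]
  omega

theorem pv_mask_lt (x : Int) (k : Nat) :
    (PySem.Int.band x (2 ^ k - 1)).toNat < 2 ^ k := by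
  rw [pv_band_mask]
  have h1 : x % ((2 ^ k : Nat) : Int) < ((2 ^ k : Nat) : Int) :=
    Int.emod_lt_of_pos x (by exact_mod_cast Nat.two_pow_pos k)
  have h2 : 0 ≤ x % ((2 ^ k : Nat) : Int) :=
    Int.emod_nonneg x (by exact_mod_cast (Nat.two_pow_pos k).ne')
  omega

theorem pv_exists_testBit {m : Nat} (h : m ≠ 0) : ∃ i, m.testBit i = true := by
  by_contra hc
  push_neg at hc
  refine h (Nat.zero_of_testBit_eq_false fun i => ?_)
  have := hc i
  revert this
  cases m.testBit i <;> simp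

-- ---------- A-side abstraction ----------

/-- All set cells of the grid. -/
def pvCells (bits : List Int) : List (Nat × Nat) :=
  ((List.range bits.length) ×ˢ (List.range (bits.length + 1))).filter
    (fun p => pvBit (bits.getD p.1 0) p.2)

def pvEdgeA (bits : List Int) (p q : Nat × Nat) : Prop :=
  p ∈ pvCells bits ∧ q ∈ pvCells bits ∧ p ≠ q ∧ (p.1 = q.1 ∨ p.2 = q.2)

def pvStepA (bits : List Int) (n : Nat) (p : Nat × Nat) (vis : List (Nat × Nat)) :
    List (Nat × Nat) :=
  (pvSameRow bits n p.1 vis).map (fun i => (p.1, i)) ++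
    (pvSameCol bits n p.2 vis).map (fun i => (i, p.2))

theorem pv_mem_cells (bits : List Int) (p : Nat × Nat) :
    p ∈ pvCells bits ↔
      p.1 < bits.length ∧ p.2 < bits.length + 1 ∧ pvBit (bits.getD p.1 0) p.2 = true := by
  obtain ⟨a, b⟩ := p
  simp [pvCells, List.mem_filter, List.mem_product, List.mem_range, and_assoc]

theorem pv_cells_len (bits : List Int) :
    (pvCells bits).length ≤ bits.length * (bits.length + 1) := by
  have h := List.length_filter_le (fun p : Nat × Nat => pvBit (bits.getD p.1 0) p.2)
    ((List.range bits.length) ×ˢ (List.range (bits.length + 1)))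
  simpa [List.length_product] using h

theorem pv_reach_row (bits : List Int) {r c c' : Nat}
    (h1 : (r, c) ∈ pvCells bits) (h2 : (r, c') ∈ pvCells bits) :
    Relation.ReflTransGen (pvEdgeA bits) (r, c) (r, c') := by
  by_cases he : c = c'
  · subst he; exact Relation.ReflTransGen.refl
  · exact Relation.ReflTransGen.single ⟨h1, h2, by simp [Prod.ext_iff, he], Or.inl rfl⟩

theorem pv_reach_col (bits : List Int) {r r' c : Nat}
    (h1 : (r, c) ∈ pvCells bits) (h2 : (r', c) ∈ pvCells bits) :
    Relation.ReflTransGen (pvEdgeA bits) (r, c) (r', c) := by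
  by_cases he : r = r'
  · subst he; exact Relation.ReflTransGen.refl
  · exact Relation.ReflTransGen.single ⟨h1, h2, by simp [Prod.ext_iff, he], Or.inr rfl⟩

theorem pvBfsA_eq_wl (bits : List Int) (n : Nat) :
    ∀ (f : Nat) (q vis : List (Nat × Nat)),
      pvBfsA bits n f q vis = pvWl (pvStepA bits n) f q vis := by
  intro f
  induction f with
  | zero => intro q vis; rfl
  | succ f ih =>
    intro q vis
    cases q with
    | nil => rfl
    | cons p q' =>
      cases p with
      | mk r c =>
        simp only [pvBfsA, pvWl, pvStepA, List.append_assoc]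
        exact ih _ _

theorem pv_stepA_nodup (bits : List Int) (n : Nat) (x : Nat × Nat) (vis : List (Nat × Nat))
    (hx : x ∈ vis) : (pvStepA bits n x vis).Nodup := by
  obtain ⟨r, c⟩ := x
  refine List.Nodup.append ?_ ?_ (List.disjoint_left.2 ?_)
  · exact (List.Nodup.filter _ List.nodup_range).map
      (by intro a b h; simpa using h)
  · exact (List.Nodup.filter _ List.nodup_range).map
      (by intro a b h; simpa using h)
  · rintro ⟨a, b⟩ hrow hcol
    rcases List.mem_map.1 hrow with ⟨i, hi, heq1⟩
    rcases List.mem_map.1 hcol with ⟨i', hi', heq2⟩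
    injection heq1 with e1 e2
    subst e1
    subst e2
    injection heq2 with e3 e4
    subst e3
    subst e4
    have hb1 := (List.mem_filter.1 hi).2
    rw [Bool.and_eq_true] at hb1
    exact absurd hx ((pv_not_contains _ _).1 hb1.2)

theorem pv_stepA_char (bits : List Int) (x : Nat × Nat) (vis : List (Nat × Nat))
    (y : Nat × Nat) (hx : x ∈ vis) (hxU : x ∈ pvCells bits) :
    y ∈ pvStepA bits bits.length x vis ↔ (pvEdgeA bits x y ∧ y ∉ vis) := by
  obtain ⟨r, c⟩ := x
  obtain ⟨r', c'⟩ := y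
  obtain ⟨hrn, hcn, hbitx⟩ := (pv_mem_cells bits (r, c)).1 hxU
  constructor
  · intro hy
    rcases List.mem_append.1 hy with h | h
    · rcases List.mem_map.1 h with ⟨i, hi, heq⟩
      injection heq with e1 e2
      subst e1
      subst e2
      have hmem := List.mem_filter.1 hi
      have hb := hmem.2
      rw [Bool.and_eq_true] at hb
      have hnv : (r, i) ∉ vis := (pv_not_contains _ _).1 hb.2
      refine ⟨⟨hxU, (pv_mem_cells _ _).2 ⟨hrn, List.mem_range.1 hmem.1, hb.1⟩, ?_, Or.inl rfl⟩, hnv⟩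
      intro he
      exact hnv (he ▸ hx)
    · rcases List.mem_map.1 h with ⟨i, hi, heq⟩
      injection heq with e1 e2
      subst e1
      subst e2
      have hmem := List.mem_filter.1 hi
      have hb := hmem.2
      rw [Bool.and_eq_true] at hb
      have hnv : (i, c) ∉ vis := (pv_not_contains _ _).1 hb.2
      refine ⟨⟨hxU, (pv_mem_cells _ _).2 ⟨List.mem_range.1 hmem.1, hcn, hb.1⟩, ?_, Or.inr rfl⟩, hnv⟩
      intro he
      exact hnv (he ▸ hx)
  · rintro ⟨⟨_, hyU, hne, hsame⟩, hnv⟩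
    obtain ⟨hr'n, hc'n, hbity⟩ := (pv_mem_cells _ _).1 hyU
    rcases hsame with h | h
    · dsimp at h
      subst h
      refine List.mem_append.2 (Or.inl (List.mem_map.2 ⟨c',
        List.mem_filter.2 ⟨List.mem_range.2 hc'n, ?_⟩, rfl⟩))
      rw [Bool.and_eq_true]
      exact ⟨hbity, (pv_not_contains _ _).2 hnv⟩
    · dsimp at h
      subst h
      refine List.mem_append.2 (Or.inr (List.mem_map.2 ⟨r',
        List.mem_filter.2 ⟨List.mem_range.2 hr'n, ?_⟩, rfl⟩))
      rw [Bool.and_eq_true]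
      exact ⟨hbity, (pv_not_contains _ _).2 hnv⟩

theorem pv_bfsA_char (bits : List Int) (s : Nat × Nat) (hs : s ∈ pvCells bits) :
    ∀ y, y ∈ pvBfsA bits bits.length (bits.length * (bits.length + 1)) [s] [s]
      ↔ Relation.ReflTransGen (pvEdgeA bits) s y := by
  intro y
  rw [pvBfsA_eq_wl]
  exact pvWl_spec (pvStepA bits bits.length) (pvEdgeA bits) (pvCells bits)
    (fun x seen y hx hxU => pv_stepA_char bits x seen y hx hxU)
    (fun x seen hx => pv_stepA_nodup bits bits.length x seen hx)
    (fun x y h => h.2.1) s hs _ (pv_cells_len bits) y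

theorem pv_rowFind_none (bits : List Int) (n i : Nat) (vis : List (Nat × Nat)) :
    pvRowFind bits n i vis = none ↔
      ∀ j, j < n + 1 → pvBit (bits.getD i 0) j = true → (i, j) ∈ vis := by
  unfold pvRowFind
  rw [List.find?_eq_none]
  constructor
  · intro h j hj hb
    by_contra hnv
    exact h j (List.mem_range.2 hj)
      (by rw [Bool.and_eq_true]; exact ⟨hb, (pv_not_contains _ _).2 hnv⟩)
  · intro h j hj hp
    rw [Bool.and_eq_true] at hp
    exact (pv_not_contains _ _).1 hp.2 (h j (List.mem_range.1 hj) hp.1)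

theorem pv_rowFind_some (bits : List Int) (n i : Nat) (vis : List (Nat × Nat)) (j : Nat)
    (h : pvRowFind bits n i vis = some j) :
    j < n + 1 ∧ pvBit (bits.getD i 0) j = true ∧ (i, j) ∉ vis := by
  have hm := List.mem_of_find?_eq_some h
  have hp := List.find?_some h
  rw [Bool.and_eq_true] at hp
  exact ⟨List.mem_range.1 hm, hp.1, (pv_not_contains _ _).1 hp.2⟩

theorem pv_outer_one (bits : List Int) (n : Nat) :
    ∀ (rest : List Nat) (vis : List (Nat × Nat)),
      (pvOuterA bits n rest vis 1 = true) ↔ ∀ i ∈ rest, pvRowFind bits n i vis = none := by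
  intro rest
  induction rest with
  | nil => intro vis; simp [pvOuterA]
  | cons i rest ih =>
    intro vis
    cases hf : pvRowFind bits n i vis with
    | none => simp [pvOuterA, hf, ih vis]
    | some j => simp [pvOuterA, hf]

def pvSeedRow (bits : List Int) (rows : List Nat) : Option Nat :=
  rows.find? (fun i => (pvRowFind bits bits.length i []).isSome)

def pvQQ (bits : List Int) (rows : List Nat) : Prop :=
  match pvSeedRow bits rows with
  | none => True
  | some i0 =>
    match pvRowFind bits bits.length i0 [] with
    | none => True
    | some j0 => ∀ p ∈ pvCells bits, p.1 ∈ rows →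
        Relation.ReflTransGen (pvEdgeA bits) (i0, j0) p

theorem pvQQ_none (bits : List Int) (rows : List Nat)
    (h : pvSeedRow bits rows = none) : pvQQ bits rows ↔ True := by
  unfold pvQQ
  simp only [h]

theorem pvQQ_some_none (bits : List Int) (rows : List Nat) (i0 : Nat)
    (h1 : pvSeedRow bits rows = some i0)
    (h2 : pvRowFind bits bits.length i0 [] = none) : pvQQ bits rows ↔ True := by
  unfold pvQQ
  simp only [h1, h2]

theorem pvQQ_some (bits : List Int) (rows : List Nat) (i0 j0 : Nat)
    (h1 : pvSeedRow bits rows = some i0)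
    (h2 : pvRowFind bits bits.length i0 [] = some j0) :
    pvQQ bits rows ↔ (∀ p ∈ pvCells bits, p.1 ∈ rows →
      Relation.ReflTransGen (pvEdgeA bits) (i0, j0) p) := by
  unfold pvQQ
  simp only [h1, h2]

theorem pv_outer_zero (bits : List Int) :
    ∀ rows : List Nat, (∀ i ∈ rows, i < bits.length) →
      ((pvOuterA bits bits.length rows [] 0 = true) ↔ pvQQ bits rows) := by
  intro rows
  induction rows with
  | nil => intro _; simp [pvOuterA, pvQQ, pvSeedRow]
  | cons i rest ih =>
    intro hrows
    have hrest : ∀ i' ∈ rest, i' < bits.length := fun i' h => hrows i' (by simp [h])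
    cases hfi : pvRowFind bits bits.length i [] with
    | none =>
      have hred : pvOuterA bits bits.length (i :: rest) [] 0
          = pvOuterA bits bits.length rest [] 0 := by
        simp [pvOuterA, hfi]
      rw [hred, ih hrest]
      have hseed : pvSeedRow bits (i :: rest) = pvSeedRow bits rest := by
        simp [pvSeedRow, List.find?_cons, hfi]
      have hrowempty : ∀ p ∈ pvCells bits, p.1 = i → False := by
        intro p hp he
        obtain ⟨h1, h2, h3⟩ := (pv_mem_cells bits p).1 hp
        have := (pv_rowFind_none bits bits.length i []).1 hfi p.2 h2 (he ▸ h3)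
        simpa using this
      cases hs : pvSeedRow bits rest with
      | none => rw [pvQQ_none bits rest hs, pvQQ_none bits (i :: rest) (hseed.trans hs)]
      | some i0 =>
        cases hj : pvRowFind bits bits.length i0 [] with
        | none =>
          rw [pvQQ_some_none bits rest i0 hs hj,
            pvQQ_some_none bits (i :: rest) i0 (hseed.trans hs) hj]
        | some j0 =>
          rw [pvQQ_some bits rest i0 j0 hs hj,
            pvQQ_some bits (i :: rest) i0 j0 (hseed.trans hs) hj]
          constructor
          · intro h p hp hmem
            rcases List.mem_cons.1 hmem with h1 | h1
            · exact absurd h1 (fun h1 => hrowempty p hp h1)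
            · exact h p hp h1
          · intro h p hp hmem
            exact h p hp (by simp [hmem])
    | some j =>
      have hin : i < bits.length := hrows i (by simp)
      obtain ⟨hjn, hjbit, -⟩ := pv_rowFind_some bits bits.length i [] j hfi
      have hsU : (i, j) ∈ pvCells bits := (pv_mem_cells _ _).2 ⟨hin, hjn, hjbit⟩
      have hred : pvOuterA bits bits.length (i :: rest) [] 0
          = pvOuterA bits bits.length rest
              (pvBfsA bits bits.length (bits.length * (bits.length + 1)) [(i, j)] [(i, j)])
              1 := by
        simp [pvOuterA, hfi]
      rw [hred, pv_outer_one]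
      have hchar := pv_bfsA_char bits (i, j) hsU
      have hseed : pvSeedRow bits (i :: rest) = some i := by
        simp [pvSeedRow, List.find?_cons, hfi]
      rw [pvQQ_some bits (i :: rest) i j hseed hfi]
      constructor
      · intro h p hp hmem
        obtain ⟨a, b⟩ := p
        obtain ⟨h1, h2, h3⟩ := (pv_mem_cells bits (a, b)).1 hp
        rcases List.mem_cons.1 hmem with hcase | hcase
        · dsimp at hcase
          subst hcase
          exact pv_reach_row bits hsU hp
        · have hv := (pv_rowFind_none bits bits.length a _).1 (h a hcase) b h2 h3
          exact (hchar (a, b)).1 hv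
      · intro h i' hi'
        rw [pv_rowFind_none]
        intro j' hj' hb'
        have hpU : (i', j') ∈ pvCells bits := (pv_mem_cells _ _).2 ⟨hrest i' hi', hj', hb'⟩
        exact (hchar (i', j')).2 (h (i', j') hpU (by simp [hi']))

-- ---------- B-side abstraction ----------

def pvMasks (bits : List Int) : List Int :=
  bits.map (fun x => PySem.Int.band x (2 ^ (bits.length + 1) - 1))

def pvMaskN (bits : List Int) (r : Nat) : Nat := ((pvMasks bits).getD r 0).toNat

def pvEdgeB (bits : List Int) (r s : Nat) : Prop :=
  r < bits.length ∧ s < bits.length ∧ pvMaskN bits r &&& pvMaskN bits s ≠ 0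

def pvStepB (bits : List Int) (n : Nat) (r : Nat) (seen : List Nat) : List Nat :=
  (List.range n).filter
    (fun s => !(seen.contains s) &&
      (PySem.Int.band ((pvMasks bits).getD s 0) ((pvMasks bits).getD r 0) != 0))

def pvUnivB (bits : List Int) : List Nat :=
  (List.range bits.length).filter (fun r => pvMaskN bits r ≠ 0)

theorem pvBfsB_eq_wl (bits : List Int) (n : Nat) :
    ∀ (f : Nat) (q seen : List Nat),
      pvBfsB (pvMasks bits) n f q seen = pvWl (pvStepB bits n) f q seen := by
  intro f
  induction f with
  | zero => intro q seen; rfl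
  | succ f ih =>
    intro q seen
    cases q with
    | nil => rfl
    | cons r q' =>
      simp only [pvBfsB, pvWl, pvStepB]
      exact ih _ _

theorem pv_masks_getD (bits : List Int) (r : Nat) (hr : r < bits.length) :
    (pvMasks bits).getD r 0
      = PySem.Int.band (bits.getD r 0) (2 ^ (bits.length + 1) - 1) := by
  unfold pvMasks
  rw [List.getD_eq_getElem?_getD, List.getElem?_map, List.getElem?_eq_getElem hr,
    List.getD_eq_getElem?_getD, List.getElem?_eq_getElem hr]
  rfl

theorem pv_masks_nonneg (bits : List Int) (r : Nat) : 0 ≤ (pvMasks bits).getD r 0 := by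
  by_cases hr : r < bits.length
  · rw [pv_masks_getD bits r hr, pv_band_mask]
    exact Int.emod_nonneg _ (by exact_mod_cast (Nat.two_pow_pos (bits.length + 1)).ne')
  · have hlen : (pvMasks bits).length ≤ r := by
      simpa [pvMasks] using Nat.le_of_not_lt hr
    rw [List.getD_eq_getElem?_getD, List.getElem?_eq_none hlen]
    simp

theorem pv_maskN_cast (bits : List Int) (r : Nat) :
    ((pvMaskN bits r : Nat) : Int) = (pvMasks bits).getD r 0 :=
  Int.toNat_of_nonneg (pv_masks_nonneg bits r)

theorem pv_maskN_lt (bits : List Int) (r : Nat) (hr : r < bits.length) :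
    pvMaskN bits r < 2 ^ (bits.length + 1) := by
  unfold pvMaskN
  rw [pv_masks_getD bits r hr]
  exact pv_mask_lt _ _

theorem pv_bitN (bits : List Int) (r c : Nat) (hr : r < bits.length)
    (hc : c < bits.length + 1) :
    (pvMaskN bits r).testBit c = pvBit (bits.getD r 0) c := by
  unfold pvMaskN
  rw [pv_masks_getD bits r hr]
  exact (pv_bit_testBit (bits.getD r 0) (bits.length + 1) c hc).symm

theorem pv_maskN_ne (bits : List Int) (r : Nat) (hr : r < bits.length) :
    pvMaskN bits r ≠ 0 ↔ ∃ c, c < bits.length + 1 ∧ pvBit (bits.getD r 0) c = true := by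
  constructor
  · intro h
    obtain ⟨c, hc⟩ := pv_exists_testBit h
    have hlt : c < bits.length + 1 := by
      by_contra hcn
      have hsmall : pvMaskN bits r < 2 ^ c :=
        lt_of_lt_of_le (pv_maskN_lt bits r hr) (Nat.pow_le_pow_right (by norm_num) (by omega))
      rw [Nat.testBit_eq_false_of_lt hsmall] at hc
      exact absurd hc (by simp)
    exact ⟨c, hlt, by rw [← pv_bitN bits r c hr hlt]; exact hc⟩
  · rintro ⟨c, hc, hb⟩ h0
    rw [← pv_bitN bits r c hr hc, h0] at hb
    simpa using hb

theorem pv_mem_univB (bits : List Int) (r : Nat) :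
    r ∈ pvUnivB bits ↔ r < bits.length ∧ pvMaskN bits r ≠ 0 := by
  simp [pvUnivB, List.mem_filter, List.mem_range]

theorem pv_stepB_char (bits : List Int) (x : Nat) (seen : List Nat) (y : Nat)
    (hx : x ∈ seen) (hxU : x ∈ pvUnivB bits) :
    y ∈ pvStepB bits bits.length x seen ↔ (pvEdgeB bits x y ∧ y ∉ seen) := by
  have hxn : x < bits.length := ((pv_mem_univB bits x).1 hxU).1
  unfold pvStepB pvEdgeB
  rw [List.mem_filter, List.mem_range]
  constructor
  · rintro ⟨hyn, hpred⟩
    rw [Bool.and_eq_true] at hpred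
    have hnc : y ∉ seen := (pv_not_contains _ _).1 hpred.1
    have hbne := hpred.2
    rw [bne_iff_ne] at hbne
    rw [← pv_maskN_cast bits y, ← pv_maskN_cast bits x, PySem.Int.band_natCast] at hbne
    have hland : pvMaskN bits y &&& pvMaskN bits x ≠ 0 := by exact_mod_cast hbne
    refine ⟨⟨hxn, hyn, ?_⟩, hnc⟩
    rw [Nat.land_comm]
    exact hland
  · rintro ⟨⟨_, hyn, hland⟩, hns⟩
    refine ⟨hyn, ?_⟩
    rw [Bool.and_eq_true]
    refine ⟨(pv_not_contains _ _).2 hns, ?_⟩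
    rw [bne_iff_ne, ← pv_maskN_cast bits y, ← pv_maskN_cast bits x, PySem.Int.band_natCast]
    rw [Nat.land_comm] at hland
    exact_mod_cast hland

theorem pv_edgeB_mem (bits : List Int) {x y : Nat} (h : pvEdgeB bits x y) :
    y ∈ pvUnivB bits := by
  refine (pv_mem_univB bits y).2 ⟨h.2.1, ?_⟩
  intro h0
  exact h.2.2 (by simp [h0])

theorem pv_bfsB_char (bits : List Int) (r0 : Nat) (hr0 : r0 ∈ pvUnivB bits) :
    ∀ y, y ∈ pvBfsB (pvMasks bits) bits.length bits.length [r0] [r0]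
      ↔ Relation.ReflTransGen (pvEdgeB bits) r0 y := by
  intro y
  rw [pvBfsB_eq_wl]
  refine pvWl_spec (pvStepB bits bits.length) (pvEdgeB bits) (pvUnivB bits)
    (fun x seen y hx hxU => pv_stepB_char bits x seen y hx hxU)
    (fun x seen _ => List.Nodup.filter _ List.nodup_range)
    (fun x y h => pv_edgeB_mem bits h) r0 hr0 bits.length ?_ y
  calc (pvUnivB bits).length ≤ (List.range bits.length).length :=
        List.length_filter_le _ _
    _ = bits.length := List.length_range

def pvQB (bits : List Int) : Prop :=
  match (List.range bits.length).find? (fun r => (pvMasks bits).getD r 0 != 0) with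
  | none => True
  | some r0 => ∀ r, r < bits.length → pvMaskN bits r ≠ 0 →
      Relation.ReflTransGen (pvEdgeB bits) r0 r

theorem pvQB_none (bits : List Int)
    (h : (List.range bits.length).find? (fun r => (pvMasks bits).getD r 0 != 0) = none) :
    pvQB bits ↔ True := by
  unfold pvQB
  simp only [h]

theorem pvQB_some (bits : List Int) (r0 : Nat)
    (h : (List.range bits.length).find? (fun r => (pvMasks bits).getD r 0 != 0) = some r0) :
    pvQB bits ↔ (∀ r, r < bits.length → pvMaskN bits r ≠ 0 →
      Relation.ReflTransGen (pvEdgeB bits) r0 r) := by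
  unfold pvQB
  simp only [h]

theorem pv_B_char (bits : List Int) : (isOneComponent_alt bits = true) ↔ pvQB bits := by
  have hrw : isOneComponent_alt bits
      = (match (List.range bits.length).find? (fun r => (pvMasks bits).getD r 0 != 0) with
        | none => true
        | some r0 =>
            ((List.range bits.length).filter (fun r => (pvMasks bits).getD r 0 != 0)).all
              (fun r => (pvBfsB (pvMasks bits) bits.length bits.length [r0] [r0]).contains r)) :=
    rfl
  rw [hrw]
  cases hf : (List.range bits.length).find? (fun r => (pvMasks bits).getD r 0 != 0) with
  | none =>
    rw [pvQB_none bits hf]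
    simp
  | some r0 =>
    dsimp only
    rw [pvQB_some bits r0 hf]
    have hr0 : r0 < bits.length := List.mem_range.1 (List.mem_of_find?_eq_some hf)
    have hp := List.find?_some hf
    rw [bne_iff_ne] at hp
    have hr0m : pvMaskN bits r0 ≠ 0 := by
      intro h0
      exact hp (by rw [← pv_maskN_cast, h0]; rfl)
    have hr0U : r0 ∈ pvUnivB bits := (pv_mem_univB _ _).2 ⟨hr0, hr0m⟩
    have hchar := pv_bfsB_char bits r0 hr0U
    rw [List.all_eq_true]
    constructor
    · intro h r hrn hrm
      have hmem : r ∈ (List.range bits.length).filter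
          (fun r => (pvMasks bits).getD r 0 != 0) := by
        refine List.mem_filter.2 ⟨List.mem_range.2 hrn, ?_⟩
        rw [bne_iff_ne]
        intro h0
        exact hrm (by unfold pvMaskN; rw [h0]; rfl)
      exact (hchar r).1 (List.contains_iff_mem.1 (h r hmem))
    · intro h r hr
      have hm := List.mem_filter.1 hr
      have hrn := List.mem_range.1 hm.1
      have hmne : pvMaskN bits r ≠ 0 := by
        have hb := hm.2
        rw [bne_iff_ne] at hb
        intro h0
        exact hb (by rw [← pv_maskN_cast, h0]; rfl)
      exact List.contains_iff_mem.2 ((hchar r).2 (h r hrn hmne))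

-- ---------- seed agreement and reach bridge ----------

theorem pv_find?_congr {α : Type} (l : List α) (p q : α → Bool)
    (h : ∀ a ∈ l, p a = q a) : l.find? p = l.find? q := by
  induction l with
  | nil => rfl
  | cons a l ih =>
    rw [List.find?_cons, List.find?_cons, h a (by simp)]
    cases q a
    · exact ih (fun b hb => h b (by simp [hb]))
    · rfl

theorem pv_seed_eq (bits : List Int) :
    pvSeedRow bits (List.range bits.length)
      = (List.range bits.length).find? (fun r => (pvMasks bits).getD r 0 != 0) := by
  apply pv_find?_congr
  intro i hi
  have hin : i < bits.length := List.mem_range.1 hi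
  rw [Bool.eq_iff_iff]
  constructor
  · intro hs
    rw [Option.isSome_iff_exists] at hs
    obtain ⟨j, hj⟩ := hs
    obtain ⟨hjn, hjb, -⟩ := pv_rowFind_some bits bits.length i [] j hj
    rw [bne_iff_ne]
    intro h0
    exact (pv_maskN_ne bits i hin).2 ⟨j, hjn, hjb⟩ (by unfold pvMaskN; rw [h0]; rfl)
  · intro hbne
    rw [bne_iff_ne] at hbne
    have hmne : pvMaskN bits i ≠ 0 := fun h0 => hbne (by rw [← pv_maskN_cast, h0]; rfl)
    obtain ⟨c, hc, hb⟩ := (pv_maskN_ne bits i hin).1 hmne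
    cases hrf : pvRowFind bits bits.length i [] with
    | some j => simp [Option.isSome]
    | none => exact absurd ((pv_rowFind_none bits bits.length i []).1 hrf c hc hb) (by simp)

theorem pv_projA (bits : List Int) {p q : Nat × Nat}
    (h : Relation.ReflTransGen (pvEdgeA bits) p q) :
    Relation.ReflTransGen (pvEdgeB bits) p.1 q.1 := by
  induction h with
  | refl => exact Relation.ReflTransGen.refl
  | @tail b c hab e ih =>
    obtain ⟨hbU, hcU, hne, hsame⟩ := e
    rcases hsame with h1 | h1
    · exact h1 ▸ ih
    · obtain ⟨hb1, hb2, hbbit⟩ := (pv_mem_cells bits b).1 hbU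
      obtain ⟨hc1, hc2, hcbit⟩ := (pv_mem_cells bits c).1 hcU
      refine ih.tail ⟨hb1, hc1, ?_⟩
      intro h0
      have htb : (pvMaskN bits b.1).testBit b.2 = true := by
        rw [pv_bitN bits b.1 b.2 hb1 hb2]; exact hbbit
      have htc : (pvMaskN bits c.1).testBit b.2 = true := by
        rw [pv_bitN bits c.1 b.2 hc1 (h1 ▸ hc2)]
        rw [h1]; exact hcbit
      have hl := congrArg (fun m => m.testBit b.2) h0
      simp only [Nat.testBit_land, htb, htc, Nat.zero_testBit] at hl
      exact absurd hl (by simp)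

theorem pv_liftB (bits : List Int) {i0 j0 : Nat} (h0 : (i0, j0) ∈ pvCells bits) {r : Nat}
    (h : Relation.ReflTransGen (pvEdgeB bits) i0 r) :
    ∀ c, (r, c) ∈ pvCells bits → Relation.ReflTransGen (pvEdgeA bits) (i0, j0) (r, c) := by
  induction h with
  | refl => intro c hc; exact pv_reach_row bits h0 hc
  | @tail b r' hab e ih =>
    intro c hc
    obtain ⟨hb1, hr1, hland⟩ := e
    obtain ⟨d, hd⟩ := pv_exists_testBit hland
    rw [Nat.testBit_land, Bool.and_eq_true] at hd
    have hdn : d < bits.length + 1 := by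
      by_contra hdd
      have hsmall : pvMaskN bits b < 2 ^ d :=
        lt_of_lt_of_le (pv_maskN_lt bits b hb1) (Nat.pow_le_pow_right (by norm_num) (by omega))
      rw [Nat.testBit_eq_false_of_lt hsmall] at hd
      exact absurd hd.1 (by simp)
    have hbd : (b, d) ∈ pvCells bits :=
      (pv_mem_cells _ _).2 ⟨hb1, hdn, by rw [← pv_bitN bits b d hb1 hdn]; exact hd.1⟩
    have hrd : (r', d) ∈ pvCells bits :=
      (pv_mem_cells _ _).2 ⟨hr1, hdn, by rw [← pv_bitN bits r' d hr1 hdn]; exact hd.2⟩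
    exact ((ih d hbd).trans (pv_reach_col bits hbd hrd)).trans (pv_reach_row bits hrd hc)

-- ===== VERDICT (by name: the statement is the Claim_ definition above) =====
theorem isOneComponent_spec : Claim_equal_isOneComponent := by
  intro bits _
  unfold Spec_isOneComponent
  rw [Bool.eq_iff_iff]
  have hA : isOneComponent bits = pvOuterA bits bits.length (List.range bits.length) [] 0 :=
    rfl
  rw [hA, pv_outer_zero bits (List.range bits.length) (fun i h => List.mem_range.1 h),
    pv_B_char]
  cases hf : (List.range bits.length).find? (fun r => (pvMasks bits).getD r 0 != 0) with
  | none =>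
    rw [pvQQ_none bits _ ((pv_seed_eq bits).trans hf), pvQB_none bits hf]
  | some i0 =>
    have hi0n : i0 < bits.length := List.mem_range.1 (List.mem_of_find?_eq_some hf)
    have hf' : pvSeedRow bits (List.range bits.length) = some i0 :=
      (pv_seed_eq bits).trans hf
    have hisome := List.find?_some hf'
    cases hj : pvRowFind bits bits.length i0 [] with
    | none => rw [hj] at hisome; simp at hisome
    | some j0 =>
      obtain ⟨hj0n, hj0b, -⟩ := pv_rowFind_some bits bits.length i0 [] j0 hj
      have h0U : (i0, j0) ∈ pvCells bits := (pv_mem_cells _ _).2 ⟨hi0n, hj0n, hj0b⟩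
      rw [pvQQ_some bits _ i0 j0 hf' hj, pvQB_some bits i0 hf]
      constructor
      · intro h r hrn hrm
        obtain ⟨c, hc, hb⟩ := (pv_maskN_ne bits r hrn).1 hrm
        have hcell : (r, c) ∈ pvCells bits := (pv_mem_cells _ _).2 ⟨hrn, hc, hb⟩
        exact pv_projA bits (h (r, c) hcell (List.mem_range.2 hrn))
      · intro h p hp hmem
        obtain ⟨a, b⟩ := p
        obtain ⟨ha, hbn, hbit⟩ := (pv_mem_cells bits (a, b)).1 hp
        exact pv_liftB bits h0U (h a ha ((pv_maskN_ne bits a ha).2 ⟨b, hbn, hbit⟩)) b hp
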